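-- pv_equiv track=rewrite | github.com/BFl47/1.1.Fondamenti-di-Informatica-I | 3.Esami/EsameDel20200218/Compiti/CompitoB/Eserc2/B_Ex2.py | B_Ex2
-- ===== SOURCE A (Python) =====
-- def sommaContorno(M,i,j):
--     somma = 0
--     for h in range(i-1,i+2):
--         for k in range(j-1,j+2):
--             if h != i or k != j:
--                 somma += M[h][k]
--     return somma
--
-- def B_Ex2(M):
--     """MODIFICARE IL CONTENUTO DI QUESTA FUNZIONE PER SVOLGERE L'ESERCIZIO"""
--     righe = len(M)
--     colonne = len(M[0])
--     minimo = sommaContorno(M,1,1)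
--     massimo = sommaContorno(M,1,1)
--     for i in range(1,righe-1):
--         for j in range(1,colonne-1):
--             if sommaContorno(M,i,j) < minimo:
--                 minimo = sommaContorno(M,i,j)
--             if sommaContorno(M,i,j) > massimo:
--                 massimo = sommaContorno(M,i,j)
--     return (minimo,massimo)
-- ===== SOURCE B (Python) =====
-- def B_Ex2(M):
--     righe = len(M)
--     colonne = len(M[0])
--     # precompute horizontal width-3 window sums once per row (sliding-window table)
--     W = [[row[j - 1] + row[j] + row[j + 1] for j in range(1, colonne - 1)] for row in M]
--     lo = hi = W[0][0] + W[1][0] + W[2][0] - M[1][1]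
--     for i in range(1, righe - 1):
--         riga = [W[i - 1][t] + W[i][t] + W[i + 1][t] - M[i][t + 1] for t in range(colonne - 2)]
--         lo = min(lo, min(riga))
--         hi = max(hi, max(riga))
--     return (lo, hi)
-- ===== Notes on version B (the rewrite author's own statement) =====
-- stated objective: alternative
-- what changed: Replaces A's streaming scan, which recomputes each 8-neighbour sum up to four times via a skip-the-center 3x3 double loop, with a sliding-window table: a matrix W of horizontal width-3 window sums is precomputed once, each interior value is then W[i-1][t]+W[i][t]+W[i+1][t]-M[i][t+1], and per-row value lists are reduced with min/max and combined into the running pair.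
import Mathlib
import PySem

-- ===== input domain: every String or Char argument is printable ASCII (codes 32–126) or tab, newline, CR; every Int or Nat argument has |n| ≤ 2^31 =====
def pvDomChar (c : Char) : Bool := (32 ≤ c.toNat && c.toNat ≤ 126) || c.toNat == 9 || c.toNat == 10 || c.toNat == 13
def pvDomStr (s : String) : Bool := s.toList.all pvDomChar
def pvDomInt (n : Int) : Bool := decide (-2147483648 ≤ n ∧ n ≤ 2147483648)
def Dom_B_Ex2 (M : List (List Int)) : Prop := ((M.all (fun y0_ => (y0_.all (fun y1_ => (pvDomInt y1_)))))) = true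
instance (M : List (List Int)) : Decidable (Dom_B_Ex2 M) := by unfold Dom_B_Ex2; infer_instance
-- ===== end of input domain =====

-- B replaces A's streaming scan (each 8-neighbour sum recomputed via a skip-the-center
-- 3x3 double loop) by a precomputed table W of horizontal width-3 window sums: each value
-- is three W entries minus the center, reduced per row with min/max — alternative, same cost.


-- ===== PORT A =====
-- M[h][k]; under Pre_ every access is in range, so the defaults are never used
def pvCell (M : List (List Int)) (h k : Int) : Int :=
  PySem.List.pyGetD (PySem.List.pyGetD M h []) k 0

def sommaContorno (M : List (List Int)) (i j : Int) : Int :=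
  (PySem.List.pyRange (i-1) (i+2) 1).foldl (fun somma h =>
    (PySem.List.pyRange (j-1) (j+2) 1).foldl (fun somma k =>
      if h ≠ i ∨ k ≠ j then somma + pvCell M h k else somma) somma) 0

def B_Ex2 (M : List (List Int)) : Int × Int :=
  let righe : Int := M.length
  let colonne : Int := (PySem.List.pyGetD M 0 []).length
  let minimo := sommaContorno M 1 1
  let massimo := sommaContorno M 1 1
  (PySem.List.pyRange 1 (righe-1) 1).foldl (fun st i =>
    (PySem.List.pyRange 1 (colonne-1) 1).foldl (fun st j =>
      let st1 := if sommaContorno M i j < st.1 then (sommaContorno M i j, st.2) else st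
      if sommaContorno M i j > st1.2 then (st1.1, sommaContorno M i j) else st1) st)
    (minimo, massimo)

-- ===== PORT B =====
-- one row of the table W: horizontal width-3 window sums row[j-1]+row[j]+row[j+1]
def pvWin (row : List Int) (colonne : Int) : List Int :=
  (PySem.List.pyRange 1 (colonne - 1) 1).map (fun j =>
    PySem.List.pyGetD row (j-1) 0 + PySem.List.pyGetD row j 0 + PySem.List.pyGetD row (j+1) 0)

def B_Ex2_alt (M : List (List Int)) : Int × Int :=
  let righe : Int := M.length
  let colonne : Int := (PySem.List.pyGetD M 0 []).length
  let W := M.map (fun row => pvWin row colonne)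
  let base := pvCell W 0 0 + pvCell W 1 0 + pvCell W 2 0 - pvCell M 1 1
  (PySem.List.pyRange 1 (righe-1) 1).foldl (fun p i =>
    let riga := (PySem.List.pyRange 0 (colonne-2) 1).map (fun t =>
      pvCell W (i-1) t + pvCell W i t + pvCell W (i+1) t - pvCell M i (t+1))
    (min p.1 ((PySem.List.min? riga (fun v => v)).getD 0),
     max p.2 ((PySem.List.max? riga (fun v => v)).getD 0)))
    (base, base)

-- ===== PRECONDITION & SPEC =====
-- Exactly the inputs on which A returns: at least 3 rows, the first row has at least 3
-- entries, and every row is at least as long as the first (otherwise A raises IndexError).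
def Pre_B_Ex2 (M : List (List Int)) : Prop :=
  3 ≤ M.length ∧ 3 ≤ (M.headI).length ∧ ∀ row ∈ M, (M.headI).length ≤ row.length
instance (M : List (List Int)) : Decidable (Pre_B_Ex2 M) := by unfold Pre_B_Ex2; infer_instance

def pvWitness_B_Ex2 : List (List Int) := [[1,2,3],[4,5,6],[7,8,9]]

def Spec_B_Ex2 (M : List (List Int)) (out : Int × Int) : Prop := out = B_Ex2_alt M
instance (M : List (List Int)) (out : Int × Int) : Decidable (Spec_B_Ex2 M out) := by unfold Spec_B_Ex2; infer_instance

-- ===== CLAIM (what is proved, stated in full; the proofs are below) =====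
def Claim_equal_B_Ex2 : Prop := ∀ (M : List (List Int)), Dom_B_Ex2 M → Pre_B_Ex2 M → Spec_B_Ex2 M (B_Ex2 M)

-- ===== LEMMAS AND PROOFS =====

lemma range3 (a : Int) : PySem.List.pyRange a (a+3) 1 = [a, a+1, a+2] := by
  rw [PySem.List.pyRange_one_cons (by omega), PySem.List.pyRange_one_cons (by omega),
      PySem.List.pyRange_one_cons (by omega), PySem.List.pyRange_one_eq_nil (by omega)]
  norm_num
  omega

-- A's 8-neighbour sum as the 8 explicit cells
lemma sc_cells (M : List (List Int)) (i j : Int) :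
    sommaContorno M i j =
      pvCell M (i-1) (j-1) + pvCell M (i-1) j + pvCell M (i-1) (j+1)
      + pvCell M i (j-1) + pvCell M i (j+1)
      + pvCell M (i+1) (j-1) + pvCell M (i+1) j + pvCell M (i+1) (j+1) := by
  unfold sommaContorno
  rw [show i + 2 = (i - 1) + 3 by ring, range3, show j + 2 = (j - 1) + 3 by ring, range3]
  have h1 : i - 1 ≠ i := by omega
  have h3 : j - 1 ≠ j := by omega
  have h2 : i - 1 + 2 ≠ i := by omega
  have h4 : j - 1 + 2 ≠ j := by omega
  simp [List.foldl, h1, h2, h3, h4]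
  ring_nf

-- rows of W are the window rows of M's rows
lemma wrow (M : List (List Int)) (c a : Int) (h0 : 0 ≤ a) (h1 : a < M.length) :
    PySem.List.pyGetD (M.map (fun row => pvWin row c)) a [] =
      pvWin (PySem.List.pyGetD M a []) c := by
  rw [PySem.List.pyGetD_eq_getElem _ _ h0 (by simpa using h1),
      PySem.List.pyGetD_eq_getElem _ _ h0 (by simpa using h1)]
  simp

-- an entry of a window row, in range
lemma winval (row : List Int) (c : Int) (k : Nat) (h1 : (k : Int) < c - 2) :
    PySem.List.pyGetD (pvWin row c) (k : Int) 0 =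
      PySem.List.pyGetD row (k : Int) 0 + PySem.List.pyGetD row ((k : Int)+1) 0
        + PySem.List.pyGetD row ((k : Int)+2) 0 := by
  unfold pvWin
  rw [PySem.List.pyGetD_map_pyRange_one _ 1 (c-1) k 0 (by omega)]
  have e1 : (1:Int) + (k:Int) - 1 = (k:Int) := by ring
  have e2 : (1:Int) + (k:Int) + 1 = (k:Int) + 2 := by ring
  have e3 : (1:Int) + (k:Int) = (k:Int) + 1 := by ring
  rw [e1, e2, e3]

-- B's table-based value equals A's 8-neighbour sum, for interior (i, 1+t)
lemma val_eq (M : List (List Int)) (i t : Int)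
    (hi0 : 1 ≤ i) (hi1 : i < (M.length : Int) - 1)
    (ht0 : 0 ≤ t) (ht1 : t < ((PySem.List.pyGetD M 0 []).length : Int) - 2) :
    pvCell (M.map (fun row => pvWin row (PySem.List.pyGetD M 0 []).length)) (i-1) t
    + pvCell (M.map (fun row => pvWin row (PySem.List.pyGetD M 0 []).length)) i t
    + pvCell (M.map (fun row => pvWin row (PySem.List.pyGetD M 0 []).length)) (i+1) t
    - pvCell M i (t+1) = sommaContorno M i (1+t) := by
  obtain ⟨k, rfl⟩ : ∃ k : Nat, ((k : Nat) : Int) = t := ⟨t.toNat, Int.toNat_of_nonneg ht0⟩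
  have e1 := wrow M ((PySem.List.pyGetD M 0 []).length : Int) (i-1) (by omega) (by omega)
  have e2 := wrow M ((PySem.List.pyGetD M 0 []).length : Int) i (by omega) (by omega)
  have e3 := wrow M ((PySem.List.pyGetD M 0 []).length : Int) (i+1) (by omega) (by omega)
  unfold pvCell
  rw [e1, e2, e3, winval _ _ k (by omega), winval _ _ k (by omega), winval _ _ k (by omega),
      sc_cells]
  unfold pvCell
  have l1 : (1:Int) + (k:Int) - 1 = (k:Int) := by ring
  have l2 : (1:Int) + (k:Int) + 1 = (k:Int) + 2 := by ring
  have l3 : (1:Int) + (k:Int) = (k:Int) + 1 := by ring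
  rw [l1, l2, l3]
  ring

-- foldl min distributes over a seeded min
lemma foldl_min_min (l : List Int) : ∀ (a x : Int),
    l.foldl min (min a x) = min a (l.foldl min x) := by
  induction l with
  | nil => intro a x; rfl
  | cons y t ih => intro a x; simp [List.foldl, min_assoc, ih]

lemma foldl_max_max (l : List Int) : ∀ (a x : Int),
    l.foldl max (max a x) = max a (l.foldl max x) := by
  induction l with
  | nil => intro a x; rfl
  | cons y t ih => intro a x; simp [List.foldl, max_assoc, ih]

-- B's per-row min/max fold over any family of nonempty rows equals min/max over the flattening
lemma fold_minmax_rows (L : List Int) (rows : Int → List Int)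
    (hne : ∀ i ∈ L, rows i ≠ []) : ∀ (a b : Int),
    L.foldl (fun p i =>
      (min p.1 ((PySem.List.min? (rows i) (fun v => v)).getD 0),
       max p.2 ((PySem.List.max? (rows i) (fun v => v)).getD 0))) (a, b)
    = ((L.flatMap rows).foldl min a, (L.flatMap rows).foldl max b) := by
  induction L with
  | nil => intro a b; rfl
  | cons i t ih =>
    intro a b
    obtain ⟨x, xs, hx⟩ := List.exists_cons_of_ne_nil (hne i (by simp))
    have ih' := ih (fun i hi => hne i (by simp [hi]))
    simp only [List.foldl, List.flatMap_cons, List.foldl_append, hx,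
      PySem.List.min?_id_cons, PySem.List.max?_id_cons, Option.getD_some, ih']
    rw [foldl_min_min xs a x, foldl_max_max xs b x, foldl_min_min, foldl_max_max]

-- one min/max step of A's loop, as min/max
lemma step_eq (st : Int × Int) (v : Int) :
    (if (if v < st.1 then (v, st.2) else st).2 < v
      then ((if v < st.1 then (v, st.2) else st).1, v)
      else (if v < st.1 then (v, st.2) else st))
    = (min st.1 v, max st.2 v) := by
  rcases st with ⟨mn, mx⟩
  by_cases h1 : v < mn <;> by_cases h2 : mx < v <;>
    simp [h1, h2, min_def, max_def] <;> omega

-- A's running (min, max) fold over any list of values equals the componentwise folds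
lemma minmax_fold (vs : List Int) (b c : Int) :
    vs.foldl (fun st v =>
        let st1 := if v < st.1 then (v, st.2) else st
        if st1.2 < v then (st1.1, v) else st1) (b, c)
    = (vs.foldl min b, vs.foldl max c) := by
  induction vs generalizing b c with
  | nil => rfl
  | cons v t ih => simpa [List.foldl, step_eq (b, c) v] using ih (min b v) (max c v)

-- a nested fold is the fold over the flattened value list
lemma nested_fold (L1 L2 : List Int) (f : Int → Int → Int)
    (g : Int × Int → Int → Int × Int) (init : Int × Int) :
    L1.foldl (fun st i => L2.foldl (fun st j => g st (f i j)) st) init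
    = (L1.flatMap (fun i => L2.map (f i))).foldl g init := by
  induction L1 generalizing init with
  | nil => rfl
  | cons i t ih => simp [List.foldl, List.flatMap_cons, List.foldl_append, List.foldl_map, ih]

-- the index shift: B's rows are A's value rows
lemma riga_eq (M : List (List Int)) (i : Int)
    (hi0 : 1 ≤ i) (hi1 : i < (M.length : Int) - 1)
    (hc : 3 ≤ ((PySem.List.pyGetD M 0 []).length : Int)) :
    (PySem.List.pyRange 0 (((PySem.List.pyGetD M 0 []).length : Int) - 2) 1).map (fun t =>
      pvCell (M.map (fun row => pvWin row (PySem.List.pyGetD M 0 []).length)) (i-1) t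
      + pvCell (M.map (fun row => pvWin row (PySem.List.pyGetD M 0 []).length)) i t
      + pvCell (M.map (fun row => pvWin row (PySem.List.pyGetD M 0 []).length)) (i+1) t
      - pvCell M i (t+1))
    = (PySem.List.pyRange 1 (((PySem.List.pyGetD M 0 []).length : Int) - 1) 1).map
        (fun j => sommaContorno M i j) := by
  rw [List.map_congr_left (fun t ht => val_eq M i t hi0 hi1
        (by simpa using (PySem.List.mem_pyRange_one.mp ht).1)
        (by simpa using (PySem.List.mem_pyRange_one.mp ht).2))]
  rw [PySem.List.pyRange_one, PySem.List.pyRange_one]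
  simp only [List.map_map]
  have hlen : (((PySem.List.pyGetD M 0 []).length : Int) - 2 - 0).toNat
      = (((PySem.List.pyGetD M 0 []).length : Int) - 1 - 1).toNat := by omega
  rw [hlen]
  exact List.map_congr_left (fun k _ => by norm_num)

-- the per-row reduction, specialised to A's value rows
lemma fold_minmax_sc (M : List (List Int)) (c : Int) (hc : 3 ≤ c) (L : List Int) (a b : Int) :
    L.foldl (fun p i =>
      (min p.1 ((PySem.List.min? ((PySem.List.pyRange 1 (c-1) 1).map
          (fun j => sommaContorno M i j)) (fun v => v)).getD 0),
       max p.2 ((PySem.List.max? ((PySem.List.pyRange 1 (c-1) 1).map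
          (fun j => sommaContorno M i j)) (fun v => v)).getD 0))) (a, b)
    = ((L.flatMap (fun i => (PySem.List.pyRange 1 (c-1) 1).map (fun j => sommaContorno M i j))).foldl min a,
       (L.flatMap (fun i => (PySem.List.pyRange 1 (c-1) 1).map (fun j => sommaContorno M i j))).foldl max b) := by
  exact fold_minmax_rows L (fun i => (PySem.List.pyRange 1 (c-1) 1).map (fun j => sommaContorno M i j))
    (fun i _ => by
      intro h
      rcases List.map_eq_nil_iff.mp h with h'
      rw [PySem.List.pyRange_one_cons (by omega)] at h'
      simp at h') a b

-- ===== VERDICT (by name: the statement is the Claim_ definition above) =====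
theorem B_Ex2_spec : Claim_equal_B_Ex2 := by
  intro M _ hpre
  obtain ⟨hr, hc, _⟩ := hpre
  have hM : M ≠ [] := by intro h; simp [h] at hr
  have hc' : 3 ≤ ((PySem.List.pyGetD M 0 []).length : Int) := by
    have : PySem.List.pyGetD M 0 [] = M.headI := by
      cases M with
      | nil => simp at hM
      | cons a t => simp [PySem.List.pyGetD_zero_cons, List.headI]
    rw [this]; exact_mod_cast hc
  have hr' : (3:Int) ≤ (M.length : Int) := by exact_mod_cast hr
  show B_Ex2 M = B_Ex2_alt M
  unfold B_Ex2 B_Ex2_alt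
  simp only
  rw [nested_fold _ _ (fun i j => sommaContorno M i j)
        (fun st v => let st1 := if v < st.1 then (v, st.2) else st
                     if st1.2 < v then (st1.1, v) else st1),
      minmax_fold]
  have hstep : ∀ i ∈ PySem.List.pyRange 1 ((M.length : Int) - 1) 1, ∀ p : Int × Int,
      (min p.1 ((PySem.List.min? ((PySem.List.pyRange 0
            (((PySem.List.pyGetD M 0 []).length : Int) - 2) 1).map (fun t =>
          pvCell (M.map (fun row => pvWin row (PySem.List.pyGetD M 0 []).length)) (i-1) t
          + pvCell (M.map (fun row => pvWin row (PySem.List.pyGetD M 0 []).length)) i t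
          + pvCell (M.map (fun row => pvWin row (PySem.List.pyGetD M 0 []).length)) (i+1) t
          - pvCell M i (t+1))) (fun v => v)).getD 0),
       max p.2 ((PySem.List.max? ((PySem.List.pyRange 0
            (((PySem.List.pyGetD M 0 []).length : Int) - 2) 1).map (fun t =>
          pvCell (M.map (fun row => pvWin row (PySem.List.pyGetD M 0 []).length)) (i-1) t
          + pvCell (M.map (fun row => pvWin row (PySem.List.pyGetD M 0 []).length)) i t
          + pvCell (M.map (fun row => pvWin row (PySem.List.pyGetD M 0 []).length)) (i+1) t
          - pvCell M i (t+1))) (fun v => v)).getD 0))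
      = (min p.1 ((PySem.List.min? ((PySem.List.pyRange 1
            (((PySem.List.pyGetD M 0 []).length : Int) - 1) 1).map
            (fun j => sommaContorno M i j)) (fun v => v)).getD 0),
         max p.2 ((PySem.List.max? ((PySem.List.pyRange 1
            (((PySem.List.pyGetD M 0 []).length : Int) - 1) 1).map
            (fun j => sommaContorno M i j)) (fun v => v)).getD 0)) := by
    intro i hi p
    have hm := PySem.List.mem_pyRange_one.mp hi
    rw [riga_eq M i hm.1 hm.2 hc']
  rw [PySem.List.foldl_congr_mem' _ _ _ _ hstep,
      fold_minmax_sc M ((PySem.List.pyGetD M 0 []).length : Int) hc']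
  -- the seeds agree: base = sommaContorno M 1 1
  have hbase : pvCell (M.map (fun row => pvWin row (PySem.List.pyGetD M 0 []).length)) 0 0
      + pvCell (M.map (fun row => pvWin row (PySem.List.pyGetD M 0 []).length)) 1 0
      + pvCell (M.map (fun row => pvWin row (PySem.List.pyGetD M 0 []).length)) 2 0
      - pvCell M 1 1 = sommaContorno M 1 1 := by
    have h := val_eq M 1 0 (by omega) (by omega) (by omega) (by omega)
    norm_num at h
    exact h
  rw [hbase]
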